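-- pv_equiv track=rewrite | github.com/TsengChunWei/New-Leetcode-problems-runtest | ex/1578(TimeTest).py | SolAlgo
-- ===== SOURCE A (Python) =====
-- def SolAlgo(colors, neededTime):
--     sum_cost = 0
--     curr = colors[0]
--     max_time = neededTime[0]
--     for i in range(1, len(neededTime)):
--         if curr == colors[i]:
--             if neededTime[i] > max_time:
--                 sum_cost += max_time
--                 max_time = neededTime[i]
--             else:
--                 sum_cost += neededTime[i]
--         else:
--             curr = colors[i]
--             max_time = neededTime[i]
--     return sum_cost
-- ===== SOURCE B (Python) =====
-- def SolAlgo(colors, neededTime):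
--     # Group the (color, time) pairs into maximal runs of equal color;
--     # each run costs sum(times) - max(times).
--     pairs = [(colors[i], neededTime[i]) for i in range(len(neededTime))]
--     total = 0
--     i = 0
--     n = len(pairs)
--     while i < n:
--         j = i + 1
--         while j < n and pairs[j][0] == pairs[i][0]:
--             j += 1
--         times = [t for _, t in pairs[i:j]]
--         total += sum(times) - max(times)
--         i = j
--     return total
-- ===== Notes on version B (the rewrite author's own statement) =====
-- stated objective: alternative
-- what changed: B zips colors with neededTime and segments the pairs into maximal runs of equal color, charging sum(times)-max(times) per run, instead of A's index loop with incremental current-color/max-time state.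
import Mathlib
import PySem

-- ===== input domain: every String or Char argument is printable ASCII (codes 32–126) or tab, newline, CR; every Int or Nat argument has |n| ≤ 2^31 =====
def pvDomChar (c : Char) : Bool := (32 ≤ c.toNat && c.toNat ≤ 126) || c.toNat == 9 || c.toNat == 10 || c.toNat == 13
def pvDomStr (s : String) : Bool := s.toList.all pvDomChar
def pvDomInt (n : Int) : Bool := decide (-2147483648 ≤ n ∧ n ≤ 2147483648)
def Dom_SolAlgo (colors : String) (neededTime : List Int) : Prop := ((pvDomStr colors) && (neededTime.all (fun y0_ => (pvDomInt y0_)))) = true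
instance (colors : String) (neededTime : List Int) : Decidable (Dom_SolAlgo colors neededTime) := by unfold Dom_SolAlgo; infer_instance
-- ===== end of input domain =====

-- B replaces A's incremental max-tracking index loop with a group-the-runs-then-reduce decomposition; same O(n) cost, return value only.

-- ===== PORT A =====
-- A's for-loop over range(1, len(neededTime)) as a foldl over the state (sum_cost, curr, max_time);
-- the 'none' match arms are exactly where the Python indexing raises (excluded by Pre_).
def SolAlgo (colors : String) (neededTime : List Int) : Int :=
  match PySem.Str.pyGet? colors 0, PySem.List.pyGet? neededTime 0 with
  | some c0, some t0 =>
      ((PySem.List.pyRange 1 (neededTime.length : Int) 1).foldl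
        (fun (st : Int × Char × Int) i =>
          match PySem.Str.pyGet? colors i, PySem.List.pyGet? neededTime i with
          | some ci, some ti =>
              if st.2.1 = ci then
                if ti > st.2.2 then (st.1 + st.2.2, st.2.1, ti)
                else (st.1 + ti, st.2.1, st.2.2)
              else (st.1, ci, ti)
          | _, _ => st)
        ((0 : Int), c0, t0)).1
  | _, _ => 0

-- ===== PORT B =====
-- Source B's pairs comprehension '[(colors[i], neededTime[i]) for i in range(len(neededTime))]';
-- the .getD defaults are exactly where the Python indexing raises (excluded by Pre_)
def altPairs (colors : String) (neededTime : List Int) : List (Char × Int) :=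
  (PySem.List.pyRange 0 (neededTime.length : Int) 1).map
    (fun i =>
      ((PySem.Str.pyGet? colors i).getD 'A', (PySem.List.pyGet? neededTime i).getD 0))

-- one maximal run at a time: head + takeWhile is Source B's inner while, sum - (fold max) is sum(times) - max(times);
-- the Nat fuel (initialised to the list length, which always suffices) only makes the recursion structural
def altGroupsF : Nat → List (Char × Int) → Int
  | _, [] => 0
  | 0, _ :: _ => 0
  | fuel + 1, (c, t) :: rest =>
      ((t :: ((rest.takeWhile (fun p => p.1 == c)).map Prod.snd)).sum
        - ((rest.takeWhile (fun p => p.1 == c)).map Prod.snd).foldl max t)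
        + altGroupsF fuel (rest.dropWhile (fun p => p.1 == c))

def SolAlgo_alt (colors : String) (neededTime : List Int) : Int :=
  altGroupsF (altPairs colors neededTime).length (altPairs colors neededTime)

-- ===== PRECONDITION & SPEC =====
-- Pre_: exactly the inputs where A's colors[0]/neededTime[0]/colors[i] indexing never raises.
def Pre_SolAlgo (colors : String) (neededTime : List Int) : Prop :=
  neededTime ≠ [] ∧ neededTime.length ≤ colors.toList.length
instance (colors : String) (neededTime : List Int) : Decidable (Pre_SolAlgo colors neededTime) := by unfold Pre_SolAlgo; infer_instance
def pvWitness_SolAlgo : String × List Int := ("aab", [4, 5, 3])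

def Spec_SolAlgo (colors : String) (neededTime : List Int) (out : Int) : Prop := out = SolAlgo_alt colors neededTime
instance (colors : String) (neededTime : List Int) (out : Int) : Decidable (Spec_SolAlgo colors neededTime out) := by unfold Spec_SolAlgo; infer_instance

-- ===== CLAIM (what is proved, stated in full; the proofs are below) =====
def Claim_equal_SolAlgo : Prop := ∀ (colors : String) (neededTime : List Int), Dom_SolAlgo colors neededTime → Pre_SolAlgo colors neededTime → Spec_SolAlgo colors neededTime (SolAlgo colors neededTime)

-- ===== LEMMAS AND PROOFS =====

-- A's loop, rephrased structurally over the (color, time) pairs it visits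
def aLoop : Int → Char → Int → List (Char × Int) → Int
  | s, _, _, [] => s
  | s, c, m, (ci, ti) :: rest =>
      if c = ci then
        if ti > m then aLoop (s + m) c ti rest else aLoop (s + ti) c m rest
      else aLoop s ci ti rest

theorem fold_eq_aLoop (colors : String) (nt : List Int)
    (hlen : nt.length ≤ colors.toList.length) :
    ∀ (d k : Nat) (s : Int) (c : Char) (m : Int), nt.length ≤ k + d →
    ((PySem.List.pyRange (k : Int) (nt.length : Int) 1).foldl
      (fun (st : Int × Char × Int) i =>
        match PySem.Str.pyGet? colors i, PySem.List.pyGet? nt i with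
        | some ci, some ti =>
            if st.2.1 = ci then
              if ti > st.2.2 then (st.1 + st.2.2, st.2.1, ti)
              else (st.1 + ti, st.2.1, st.2.2)
            else (st.1, ci, ti)
        | _, _ => st)
      (s, c, m)).1 = aLoop s c m ((colors.toList.zip nt).drop k) := by
  intro d
  induction d with
  | zero =>
    intro k s c m hk
    rw [PySem.List.pyRange_one_eq_nil (by exact_mod_cast hk)]
    rw [List.drop_eq_nil_of_le (by rw [List.length_zip]; omega)]
    rfl
  | succ d ih =>
    intro k s c m hk
    by_cases h : nt.length ≤ k
    · rw [PySem.List.pyRange_one_eq_nil (by exact_mod_cast h)]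
      rw [List.drop_eq_nil_of_le (by rw [List.length_zip]; omega)]
      rfl
    · rw [not_le] at h
      have hkcl : k < colors.toList.length := lt_of_lt_of_le h hlen
      rw [PySem.List.pyRange_one_cons (by exact_mod_cast h), List.foldl_cons]
      have hget1 : PySem.Str.pyGet? colors (k : Int) = some colors.toList[k] := by
        rw [PySem.Str.pyGet?_natCast, List.getElem?_eq_getElem hkcl]
      have hget2 : PySem.List.pyGet? nt (k : Int) = some nt[k] := by
        rw [PySem.List.pyGet?_natCast, List.getElem?_eq_getElem h]
      have hdz : (colors.toList.zip nt).drop k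
          = (colors.toList[k], nt[k]) :: (colors.toList.zip nt).drop (k + 1) := by
        rw [List.drop_eq_getElem_cons (by rw [List.length_zip]; omega)]
        rw [List.getElem_zip]
      rw [hdz]
      have hcast : ((k : Int) + 1) = ((k + 1 : Nat) : Int) := by push_cast; ring
      simp only [hget1, hget2, hcast]
      rw [aLoop]
      by_cases hc : c = colors.toList[k]
      · by_cases htm : nt[k] > m
        · simp only [hc, if_pos htm]
          exact ih (k + 1) (s + m) colors.toList[k] nt[k] (by omega)
        · simp only [hc, if_neg htm]
          exact ih (k + 1) (s + nt[k]) colors.toList[k] m (by omega)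
      · simp only [if_neg hc]
        exact ih (k + 1) s colors.toList[k] nt[k] (by omega)

theorem altGroupsF_congr : ∀ (n m : Nat) (ps : List (Char × Int)),
    ps.length ≤ n → ps.length ≤ m → altGroupsF n ps = altGroupsF m ps := by
  intro n
  induction n with
  | zero =>
    intro m ps h1 _
    cases ps with
    | nil => cases m <;> simp [altGroupsF]
    | cons p rest => simp at h1
  | succ n ih =>
    intro m ps h1 h2
    match ps, m with
    | [], _ => cases m <;> simp [altGroupsF]
    | (c, t) :: rest, m + 1 =>
      simp only [altGroupsF]
      have hd := List.length_dropWhile_le (fun p => p.1 == c) rest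
      rw [ih m (rest.dropWhile (fun p => p.1 == c)) (by simp at h1 ⊢; omega)
        (by simp at h2 ⊢; omega)]

theorem aLoop_eq_altGroups (ps : List (Char × Int)) :
    ∀ (s : Int) (c : Char) (m : Int),
    aLoop s c m ps = s + altGroupsF (ps.length + 1) ((c, m) :: ps) := by
  induction ps with
  | nil => intro s c m; simp [aLoop, altGroupsF]
  | cons p rest ih =>
    obtain ⟨ci, ti⟩ := p
    intro s c m
    by_cases hc : c = ci
    · subst hc
      have hdrop : (rest.dropWhile (fun p => p.1 == c)).length ≤ rest.length :=
        List.length_dropWhile_le _ _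
      by_cases ht : ti > m
      · rw [aLoop, if_pos rfl, if_pos ht, ih]
        simp only [altGroupsF, List.length_cons, List.takeWhile_cons, List.dropWhile_cons,
          beq_self_eq_true, if_true, List.map_cons, List.sum_cons, List.foldl_cons]
        rw [max_eq_right ht.le,
          altGroupsF_congr rest.length (rest.length + 1) _ hdrop (by omega)]
        ring
      · rw [aLoop, if_pos rfl, if_neg ht, ih]
        simp only [altGroupsF, List.length_cons, List.takeWhile_cons, List.dropWhile_cons,
          beq_self_eq_true, if_true, List.map_cons, List.sum_cons, List.foldl_cons]
        rw [max_eq_left (by omega),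
          altGroupsF_congr rest.length (rest.length + 1) _ hdrop (by omega)]
        ring
    · rw [aLoop, if_neg hc, ih]
      have hne : (ci == c) = false := by
        simp [beq_eq_false_iff_ne]; exact fun h => hc h.symm
      conv_rhs => rw [altGroupsF]
      simp only [hne, Bool.false_eq_true, if_false, List.takeWhile_cons, List.dropWhile_cons,
        List.map_nil, List.sum_cons, List.sum_nil, List.foldl_nil, List.length_cons]
      ring_nf

theorem altPairs_eq_zip (colors : String) (nt : List Int)
    (hlen : nt.length ≤ colors.toList.length) :
    altPairs colors nt = colors.toList.zip nt := by
  apply List.ext_getElem?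
  intro k
  by_cases hk : k < nt.length
  · rw [altPairs, PySem.List.getElem?_map_pyRange_zero _ _ _ hk]
    have hget1 : PySem.Str.pyGet? colors (k : Int) = some colors.toList[k] := by
      rw [PySem.Str.pyGet?_natCast, List.getElem?_eq_getElem (by omega)]
    have hget2 : PySem.List.pyGet? nt (k : Int) = some nt[k] := by
      rw [PySem.List.pyGet?_natCast, List.getElem?_eq_getElem hk]
    rw [List.getElem?_eq_getElem (by rw [List.length_zip]; omega)]
    simp only [hget1, hget2, List.getElem_zip, Option.getD_some]
  · rw [List.getElem?_eq_none (by simp [altPairs, PySem.List.length_pyRange_one]; omega),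
      List.getElem?_eq_none (by rw [List.length_zip]; omega)]

-- ===== VERDICT (by name: the statement is the Claim_ definition above) =====
theorem SolAlgo_spec : Claim_equal_SolAlgo := by
  intro colors nt _ hpre
  obtain ⟨hne, hlen⟩ := hpre
  have hnt0 : 0 < nt.length := List.length_pos_iff.mpr hne
  have hcl0 : 0 < colors.toList.length := lt_of_lt_of_le hnt0 hlen
  have hget1 : PySem.Str.pyGet? colors 0 = some colors.toList[0] := by
    rw [show (0 : Int) = ((0 : Nat) : Int) from rfl, PySem.Str.pyGet?_natCast,
      List.getElem?_eq_getElem hcl0]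
  have hget2 : PySem.List.pyGet? nt 0 = some nt[0] := by
    rw [show (0 : Int) = ((0 : Nat) : Int) from rfl, PySem.List.pyGet?_natCast,
      List.getElem?_eq_getElem hnt0]
  unfold Spec_SolAlgo SolAlgo
  rw [hget1, hget2]
  simp only []
  have hfold := fold_eq_aLoop colors nt hlen nt.length 1 0 colors.toList[0] nt[0] (by omega)
  rw [show ((1 : Nat) : Int) = (1 : Int) from rfl] at hfold
  rw [hfold]
  have hdz : (colors.toList.zip nt).drop 1
      = (colors.toList.zip nt).tail := List.drop_one
  rw [hdz]
  have hzlen : 0 < (colors.toList.zip nt).length := by rw [List.length_zip]; omega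
  have hcons : colors.toList.zip nt
      = (colors.toList[0], nt[0]) :: (colors.toList.zip nt).tail := by
    conv_lhs => rw [← List.drop_zero (l := colors.toList.zip nt),
      List.drop_eq_getElem_cons hzlen]
    rw [List.getElem_zip, List.drop_one]
  rw [aLoop_eq_altGroups]
  unfold SolAlgo_alt
  rw [altPairs_eq_zip colors nt hlen]
  conv_rhs => rw [hcons]
  rw [show ((colors.toList.zip nt).tail.length + 1)
      = ((colors.toList[0], nt[0]) :: (colors.toList.zip nt).tail).length from rfl]
  ring
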